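-- pv_equiv track=rewrite | github.com/boon-code/pfrinc4 | src/pfinfo.py | _correct_msg
-- ===== SOURCE A (Python) =====
-- def _correct_msg(msg):
--     "checks if message has right format, returns valid message."
--
--     l = 'l'
--     data = []
--     for i in msg:
--         if l == '\n' and i == '\n':
--             pass
--         else:
--             data.append(i)
--             l = i
--
--     return ("".join(data)).strip('\n')
-- ===== SOURCE B (Python) =====
-- def _correct_msg(msg):
--     "checks if message has right format, returns valid message."
--     return "\n".join(seg for seg in msg.split('\n') if seg)
-- ===== Notes on version B (the rewrite author's own statement) =====
-- stated objective: simpler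
-- what changed: Replaced the stateful character loop that tracks the previous character to skip duplicate newlines (plus a final strip) with a one-line split/filter/join pipeline: splitting on the newline character and rejoining the non-empty segments collapses newline runs and strips boundary newlines at once.
import Mathlib
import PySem

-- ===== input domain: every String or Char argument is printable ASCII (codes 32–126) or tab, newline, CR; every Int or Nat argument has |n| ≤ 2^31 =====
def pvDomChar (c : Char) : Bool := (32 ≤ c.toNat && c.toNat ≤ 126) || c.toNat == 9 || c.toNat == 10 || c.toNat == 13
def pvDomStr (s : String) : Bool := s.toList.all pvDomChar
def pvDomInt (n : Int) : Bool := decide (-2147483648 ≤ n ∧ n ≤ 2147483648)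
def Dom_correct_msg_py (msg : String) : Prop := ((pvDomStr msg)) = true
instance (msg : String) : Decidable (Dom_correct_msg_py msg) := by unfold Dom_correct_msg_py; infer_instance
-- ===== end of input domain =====

-- B replaces A's stateful character loop (previous-char tracking + final strip) with a
-- split('\n') / drop-empty-segments / join('\n') pipeline: simpler, same O(n) cost.

-- ===== PORT A =====
-- l = 'l'; data = []; for i in msg: if l=='\n' and i=='\n': pass else: data.append(i); l=i
-- return "".join(data).strip('\n')
def correct_msg_py (msg : String) : String :=
  let r := msg.toList.foldl
    (fun (st : Char × List Char) i =>
      if st.1 = '\n' ∧ i = '\n' then st else (i, st.2 ++ [i]))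
    ('l', ([] : List Char))
  String.ofList (PySem.Chars.stripChars r.2 ['\n'])

-- ===== PORT B =====
-- return "\n".join(seg for seg in msg.split('\n') if seg)
def correct_msg_py_alt (msg : String) : String :=
  String.ofList (PySem.Chars.join ['\n']
    ((PySem.Chars.splitOn msg.toList ['\n']).filter (fun seg => !seg.isEmpty)))

-- ===== PRECONDITION & SPEC =====
def Spec_correct_msg_py (msg : String) (out : String) : Prop := out = correct_msg_py_alt msg
instance (msg : String) (out : String) : Decidable (Spec_correct_msg_py msg out) := by unfold Spec_correct_msg_py; infer_instance

-- ===== CLAIM (what is proved, stated in full; the proofs are below) =====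
def Claim_equal_correct_msg_py : Prop := ∀ (msg : String), Dom_correct_msg_py msg → Spec_correct_msg_py msg (correct_msg_py msg)

-- ===== LEMMAS AND PROOFS =====

-- A's loop as a structural recursion: state = previous char, result = emitted chars.
def pvCollapse : Char → List Char → List Char
  | _, [] => []
  | l, c :: cs => if l = '\n' ∧ c = '\n' then pvCollapse l cs else c :: pvCollapse c cs

-- splitOn by a single '\n' as a structural recursion.
def pvSplit : List Char → List (List Char)
  | [] => [[]]
  | c :: cs =>
    if c = '\n' then [] :: pvSplit cs
    else match pvSplit cs with
      | [] => [[c]]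
      | s :: ss => (c :: s) :: ss

def pvNL (c : Char) : Bool := c == '\n'
def pvLstrip (t : List Char) : List Char := t.dropWhile pvNL
def pvRstrip (t : List Char) : List Char := (t.reverse.dropWhile pvNL).reverse
def pvNE (s : List Char) : Bool := !s.isEmpty
def pvTailJoin (ss : List (List Char)) : List Char :=
  if ss.filter pvNE = [] then [] else '\n' :: PySem.Chars.join ['\n'] (ss.filter pvNE)

theorem pv_foldA (cs : List Char) : ∀ (l : Char) (acc : List Char),
    (cs.foldl (fun (st : Char × List Char) i =>
      if st.1 = '\n' ∧ i = '\n' then st else (i, st.2 ++ [i])) (l, acc)).2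
      = acc ++ pvCollapse l cs := by
  induction cs with
  | nil => intro l acc; simp [pvCollapse]
  | cons c cs ih =>
    intro l acc
    by_cases h : l = '\n' ∧ c = '\n'
    · simp [List.foldl_cons, h, pvCollapse, ih]
    · simp [List.foldl_cons, h, pvCollapse, ih]

theorem pv_collapse_ne (cs : List Char) (l : Char) (h : l ≠ '\n') :
    pvCollapse l cs = pvCollapse 'l' cs := by
  cases cs with
  | nil => rfl
  | cons c cs => simp [pvCollapse, h]

theorem pv_g_no_lead (cs : List Char) : pvLstrip (pvCollapse '\n' cs) = pvCollapse '\n' cs := by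
  induction cs with
  | nil => rfl
  | cons c cs ih =>
    by_cases h : c = '\n'
    · simpa [pvCollapse, h] using ih
    · simp [pvCollapse, h, pvLstrip, pvNL]

theorem pv_lstrip_f (cs : List Char) : pvLstrip (pvCollapse 'l' cs) = pvCollapse '\n' cs := by
  cases cs with
  | nil => rfl
  | cons c cs =>
    by_cases h : c = '\n'
    · subst h
      simpa [pvCollapse, pvLstrip, pvNL] using pv_g_no_lead cs
    · simp [pvCollapse, pvLstrip, pvNL, h]

theorem pv_nl_decide : pvNL = fun c => decide (c = '\n') := by
  funext c; by_cases h : c = '\n' <;> simp [pvNL, h]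

theorem pv_strip_eq (t : List Char) :
    PySem.Chars.stripChars t ['\n'] = pvRstrip (pvLstrip t) := by
  unfold pvRstrip pvLstrip
  rw [pv_nl_decide]; simp [PySem.Chars.stripChars]

theorem pv_rstrip_cons_ne (c : Char) (t : List Char) (h : c ≠ '\n') :
    pvRstrip (c :: t) = c :: pvRstrip t := by
  have hc : pvNL c = false := by simp [pvNL, h]
  simp only [pvRstrip, List.reverse_cons, List.dropWhile_append]
  by_cases he : (t.reverse.dropWhile pvNL).isEmpty
  · simp_all [List.isEmpty_iff, List.dropWhile]
  · simp [he]

theorem pv_rstrip_cons_nl (t : List Char) :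
    pvRstrip ('\n' :: t) = if pvRstrip t = [] then [] else '\n' :: pvRstrip t := by
  have hc : pvNL '\n' = true := by simp [pvNL]
  simp only [pvRstrip, List.reverse_cons, List.dropWhile_append]
  by_cases he : (t.reverse.dropWhile pvNL).isEmpty
  · simp_all [List.isEmpty_iff, List.dropWhile]
  · have : ¬ (t.reverse.dropWhile pvNL).reverse = [] := by
      simp_all [List.isEmpty_iff]
    simp [he, this]

theorem pv_split_ne_nil (cs : List Char) : pvSplit cs ≠ [] := by
  cases cs with
  | nil => simp [pvSplit]
  | cons c cs =>
    by_cases h : c = '\n'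
    · simp [pvSplit, h]
    · simp only [pvSplit, h, if_false]
      cases pvSplit cs <;> simp

theorem pv_join_cons (x : List Char) (l : List (List Char)) :
    PySem.Chars.join ['\n'] (x :: l)
      = x ++ (if l = [] then [] else '\n' :: PySem.Chars.join ['\n'] l) := by
  cases l with
  | nil => simp [PySem.Chars.join, List.intercalate]
  | cons y ys => simp [PySem.Chars.join, List.intercalate, List.intersperse]

theorem pv_joinFilter_eq_nil_iff (l : List (List Char)) :
    PySem.Chars.join ['\n'] (l.filter pvNE) = [] ↔ l.filter pvNE = [] := by
  constructor
  · intro h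
    by_contra hne
    rcases hl : l.filter pvNE with _ | ⟨x, xs⟩
    · exact hne hl
    · have hx : pvNE x = true := List.of_mem_filter (by rw [hl]; exact List.mem_cons_self ..)
      have hxne : x ≠ [] := by simpa [pvNE, List.isEmpty_iff] using hx
      rw [hl, pv_join_cons] at h
      rcases List.append_eq_nil_iff.mp h with ⟨h1, _⟩
      exact hxne h1
  · intro h; rw [h]; rfl

-- splitOn ['\n'] computes pvSplit.
theorem pv_go_spec (fuel : Nat) : ∀ (l cur : List Char) (acc : List (List Char)),
    l.length ≤ fuel →
    PySem.Chars.splitOn.go ['\n'] fuel l cur acc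
      = acc.reverse ++ (match pvSplit l with
          | [] => [cur.reverse]
          | s :: ss => (cur.reverse ++ s) :: ss) := by
  induction fuel with
  | zero =>
    intro l cur acc h
    have : l = [] := List.eq_nil_of_length_eq_zero (Nat.le_zero.mp h)
    subst this
    simp [PySem.Chars.splitOn.go, pvSplit]
  | succ fuel ih =>
    intro l cur acc h
    cases l with
    | nil => simp [PySem.Chars.splitOn.go, pvSplit]
    | cons c rest =>
      by_cases hc : c = '\n'
      · subst hc
        have hpre : List.isPrefixOf ['\n'] ('\n' :: rest) = true := by
          simp [List.isPrefixOf]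
        rw [PySem.Chars.splitOn.go]
        simp only [hpre, if_true]
        have hdrop : List.drop (['\n'] : List Char).length ('\n' :: rest) = rest := rfl
        rw [hdrop, ih rest [] (cur.reverse :: acc) (by simpa using Nat.le_of_succ_le_succ h)]
        rcases hsp : pvSplit rest with _ | ⟨s, ss⟩
        · exact absurd hsp (pv_split_ne_nil rest)
        · simp [pvSplit, hsp]
      · have hpre : List.isPrefixOf ['\n'] (c :: rest) = false := by
          simp [List.isPrefixOf]
          exact fun h' => hc h'.symm
        rw [PySem.Chars.splitOn.go]
        simp only [hpre, Bool.false_eq_true, if_false]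
        rw [ih rest (c :: cur) acc (by simpa using Nat.le_of_succ_le_succ h)]
        rcases hsp : pvSplit rest with _ | ⟨s, ss⟩
        · exact absurd hsp (pv_split_ne_nil rest)
        · simp [pvSplit, hc, hsp]

theorem pv_splitOn_eq (cs : List Char) :
    PySem.Chars.splitOn cs ['\n'] = pvSplit cs := by
  rw [PySem.Chars.splitOn, pv_go_spec (cs.length + 1) cs [] [] (Nat.le_succ _)]
  rcases hsp : pvSplit cs with _ | ⟨s, ss⟩
  · exact absurd hsp (pv_split_ne_nil cs)
  · simp

-- The main invariant, both halves at once.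
theorem pv_main (cs : List Char) :
    (pvRstrip (pvCollapse '\n' cs)
        = PySem.Chars.join ['\n'] ((pvSplit cs).filter pvNE))
    ∧ (∀ s ss, pvSplit cs = s :: ss → pvRstrip (pvCollapse 'l' cs) = s ++ pvTailJoin ss) := by
  induction cs with
  | nil =>
    constructor
    · simp [pvCollapse, pvSplit, pvRstrip, pvNE, PySem.Chars.join, List.intercalate]
    · intro s ss h
      simp only [pvSplit] at h
      cases h
      simp [pvCollapse, pvRstrip, pvTailJoin]
  | cons c cs ih =>
    obtain ⟨ihP, ihQ⟩ := ih
    rcases hsp : pvSplit cs with _ | ⟨h0, t0⟩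
    · exact absurd hsp (pv_split_ne_nil cs)
    by_cases hc : c = '\n'
    · subst hc
      have hg : pvCollapse '\n' ('\n' :: cs) = pvCollapse '\n' cs := by simp [pvCollapse]
      have hs : pvSplit ('\n' :: cs) = [] :: pvSplit cs := by simp [pvSplit]
      have hfe : pvNE ([] : List Char) = false := by simp [pvNE]
      constructor
      · rw [hg, hs, List.filter_cons_of_neg (by simp [hfe]), ihP]
      · intro s ss h
        rw [hs] at h
        cases h
        have hcol : pvCollapse 'l' ('\n' :: cs) = '\n' :: pvCollapse '\n' cs := by
          simp [pvCollapse]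
        rw [hcol, pv_rstrip_cons_nl, ihP, pvTailJoin]
        by_cases hnil : (pvSplit cs).filter pvNE = []
        · simp [hnil]
        · have : ¬ PySem.Chars.join ['\n'] ((pvSplit cs).filter pvNE) = [] := by
            intro hh; exact hnil ((pv_joinFilter_eq_nil_iff _).mp hh)
          simp [hnil, this]
    · have hcolg : pvCollapse '\n' (c :: cs) = c :: pvCollapse 'l' cs := by
        simp [pvCollapse, hc, pv_collapse_ne cs c hc]
      have hcolf : pvCollapse 'l' (c :: cs) = c :: pvCollapse 'l' cs := by
        simp [pvCollapse, hc, pv_collapse_ne cs c hc]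
      have hspc : pvSplit (c :: cs) = (c :: h0) :: t0 := by
        simp [pvSplit, hc, hsp]
      have hQ := ihQ h0 t0 hsp
      constructor
      · rw [hcolg, pv_rstrip_cons_ne c _ hc, hQ, hspc]
        have hne : pvNE (c :: h0) = true := by simp [pvNE]
        rw [List.filter_cons_of_pos hne, pv_join_cons]
        by_cases hnil : t0.filter pvNE = []
        · simp [pvTailJoin, hnil]
        · simp [pvTailJoin, hnil]
      · intro s ss h
        rw [hspc] at h
        cases h
        rw [hcolf, pv_rstrip_cons_ne c _ hc, hQ]
        simp

-- ===== VERDICT (by name: the statement is the Claim_ definition above) =====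
theorem correct_msg_py_spec : Claim_equal_correct_msg_py := by
  intro msg _
  unfold Spec_correct_msg_py correct_msg_py correct_msg_py_alt
  rw [pv_splitOn_eq]
  have hfold := pv_foldA msg.toList 'l' []
  simp only [hfold, List.nil_append, pv_strip_eq, pv_lstrip_f]
  exact congrArg String.ofList (pv_main msg.toList).1
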